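-- pv_equiv track=rewrite | github.com/TheSeamau5/envoi | packages/code/envoi_code/utils/feedback_helpers.py | normalize_suite_path
-- ===== SOURCE A (Python) =====
-- def normalize_suite_path(value: str | None) -> str:
--     if not value:
--         return ""
--     parts = [part for part in value.split("/") if part]
--     if not parts:
--         return ""
--     normalized = [parts[0]]
--     for part in parts[1:]:
--         if part == normalized[-1]:
--             continue
--         normalized.append(part)
--     return "/".join(normalized)
-- ===== SOURCE B (Python) =====
-- def normalize_suite_path(value: str | None) -> str:
--     if not value:
--         return ""
--     out = []      # characters of the result
--     last = None   # characters of the last emitted segment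
--     cur = []      # characters of the segment being read
--     for ch in value + "/":
--         if ch == "/":
--             if cur and cur != last:
--                 if out:
--                     out.append("/")
--                 out.extend(cur)
--                 last = cur
--             cur = []
--         else:
--             cur.append(ch)
--     return "".join(out)
-- ===== Notes on version B (the rewrite author's own statement) =====
-- stated objective: alternative
-- what changed: Replaces A's three staged passes (split into a parts list, filter empties, collapse duplicates against the accumulator's last element, then join) by a single character-level scan that never builds a parts list: it assembles each segment char by char and streams it straight into the output buffer unless it is empty or repeats the last emitted segment.
import Mathlib
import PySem

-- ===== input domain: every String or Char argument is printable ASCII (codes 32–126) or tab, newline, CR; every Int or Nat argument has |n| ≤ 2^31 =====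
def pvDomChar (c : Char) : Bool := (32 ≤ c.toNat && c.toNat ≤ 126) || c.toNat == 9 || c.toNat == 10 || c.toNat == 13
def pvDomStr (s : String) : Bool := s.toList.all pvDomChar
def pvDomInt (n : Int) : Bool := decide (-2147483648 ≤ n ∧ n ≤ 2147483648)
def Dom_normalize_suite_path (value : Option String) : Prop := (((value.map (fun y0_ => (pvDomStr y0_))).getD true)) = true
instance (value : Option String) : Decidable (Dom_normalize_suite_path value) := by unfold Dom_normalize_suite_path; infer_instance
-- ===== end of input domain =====

-- B replaces A's staged passes (split into a parts list, filter, collapse against the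
-- accumulator's last element, join) by a single character-level scan that builds no parts
-- list: it assembles each segment char by char and streams it straight into the output.

-- ===== PORT A =====
def normalize_suite_path (value : Option String) : String :=
  match value with
  | none => ""
  | some s =>
    if s == "" then ""
    else
      let parts := ((PySem.Str.split? s "/").getD []).filter (fun part => part != "")
      match parts with
      | [] => ""
      | p0 :: rest =>
        let normalized := rest.foldl
          (fun (acc : List String) part => if some part == acc.getLast? then acc else acc ++ [part]) [p0]
        PySem.Str.join "/" normalized

-- ===== PORT B =====
-- one step of B's char scan: state = (output chars, last emitted segment, current segment)
def pvScanStep (st : List Char × Option (List Char) × List Char) (ch : Char) :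
    List Char × Option (List Char) × List Char :=
  match st with
  | (out, last, cur) =>
    if ch == '/' then
      if cur != [] && some cur != last then
        ((if out != [] then out ++ '/' :: cur else out ++ cur), some cur, [])
      else (out, last, [])
    else (out, last, cur ++ [ch])

def normalize_suite_path_alt (value : Option String) : String :=
  match value with
  | none => ""
  | some s =>
    if s == "" then ""
    else String.ofList ((s.toList ++ ['/']).foldl pvScanStep ([], none, [])).1

-- ===== PRECONDITION & SPEC =====
def Spec_normalize_suite_path (value : Option String) (out : String) : Prop := out = normalize_suite_path_alt value
instance (value : Option String) (out : String) : Decidable (Spec_normalize_suite_path value out) := by unfold Spec_normalize_suite_path; infer_instance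

-- ===== CLAIM (what is proved, stated in full; the proofs are below) =====
def Claim_equal_normalize_suite_path : Prop := ∀ (value : Option String), Dom_normalize_suite_path value → Spec_normalize_suite_path value (normalize_suite_path value)

-- ===== LEMMAS AND PROOFS =====

def pvSplit (cur : List Char) : List Char → List (List Char)
  | [] => [cur]
  | c :: rest => if c = '/' then cur :: pvSplit [] rest else pvSplit (cur ++ [c]) rest

theorem pvGo_eq (fuel : Nat) :
    ∀ (l cur : List Char) (accs : List (List Char)), l.length < fuel →
      PySem.Chars.splitOn.go ['/'] fuel l cur accs = accs.reverse ++ pvSplit cur.reverse l := by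
  induction fuel with
  | zero => intro l cur accs h; omega
  | succ fuel ih =>
    intro l cur accs h
    match l with
    | [] =>
      rw [PySem.Chars.splitOn.go]
      · simp [pvSplit]
      · omega
    | c :: rest =>
      rw [PySem.Chars.splitOn.go]
      by_cases hc : c = '/'
      · subst hc
        have hp : List.isPrefixOf ['/'] ('/' :: rest) = true := by simp [List.isPrefixOf]
        simp only [hp, if_true]
        rw [ih _ _ _ (by simpa using Nat.lt_of_succ_lt_succ h)]
        simp [pvSplit]
      · have hp : List.isPrefixOf ['/'] (c :: rest) = false := by simp [List.isPrefixOf]; exact fun e => hc e.symm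
        simp only [hp, Bool.false_eq_true, if_false]
        rw [ih _ _ _ (by simpa using Nat.lt_of_succ_lt_succ h)]
        simp [pvSplit, hc]

theorem pvSplitOn_eq (cs : List Char) : PySem.Chars.splitOn cs ['/'] = pvSplit [] cs := by
  rw [PySem.Chars.splitOn, pvGo_eq (cs.length + 1) cs [] [] (by omega)]
  simp

def pvEmit (st : List Char × Option (List Char)) (seg : List Char) : List Char × Option (List Char) :=
  match st with
  | (out, last) =>
    if seg != [] && some seg != last then
      ((if out != [] then out ++ '/' :: seg else out ++ seg), some seg)
    else (out, last)

theorem pvScan_eq (cs : List Char) :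
    ∀ (out cur : List Char) (last : Option (List Char)),
      (cs ++ ['/']).foldl pvScanStep (out, last, cur)
        = (((pvSplit cur cs).foldl pvEmit (out, last)).1,
           ((pvSplit cur cs).foldl pvEmit (out, last)).2, []) := by
  induction cs with
  | nil =>
    intro out cur last
    simp [pvSplit, pvScanStep, pvEmit]
    split <;> simp
  | cons c rest ih =>
    intro out cur last
    by_cases hc : c = '/'
    · subst hc
      simp only [List.cons_append, List.foldl_cons, pvSplit]
      rw [show pvScanStep (out, last, cur) '/' = (((pvEmit (out, last) cur).1, (pvEmit (out, last) cur).2, [])) from ?_]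
      · rw [ih]; simp
      · simp [pvScanStep, pvEmit]; split <;> simp
    · simp only [List.cons_append, List.foldl_cons, pvSplit, if_neg hc]
      rw [show pvScanStep (out, last, cur) c = (out, last, cur ++ [c]) from ?_]
      · rw [ih]
      · simp [pvScanStep, hc]

def pvJoin (ns : List (List Char)) : List Char := List.intercalate ['/'] ns

theorem pvJoin_cons_cons (x y : List Char) (xs : List (List Char)) :
    pvJoin (x :: y :: xs) = x ++ '/' :: pvJoin (y :: xs) := by
  simp [pvJoin, List.intercalate, List.intersperse]

theorem pvJoin_singleton (x : List Char) : pvJoin [x] = x := by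
  simp [pvJoin, List.intercalate, List.intersperse]

theorem pvJoin_append_singleton (ns : List (List Char)) (seg : List Char) (h : ns ≠ []) :
    pvJoin (ns ++ [seg]) = pvJoin ns ++ '/' :: seg := by
  induction ns with
  | nil => exact absurd rfl h
  | cons x xs ih =>
    cases xs with
    | nil => simp [pvJoin_cons_cons, pvJoin_singleton]
    | cons y ys =>
      have e1 : (x :: y :: ys) ++ [seg] = x :: y :: (ys ++ [seg]) := by simp
      rw [e1, pvJoin_cons_cons, ← List.cons_append, ih (by simp), pvJoin_cons_cons]
      simp

theorem pvJoin_ne_nil (ns : List (List Char)) (h : ns ≠ []) (hx : ∀ x ∈ ns, x ≠ []) :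
    pvJoin ns ≠ [] := by
  cases ns with
  | nil => exact absurd rfl h
  | cons x xs =>
    cases xs with
    | nil => rw [pvJoin_singleton]; exact hx x (by simp)
    | cons y ys =>
      rw [pvJoin_cons_cons]
      have := hx x (by simp)
      cases x with
      | nil => exact absurd rfl this
      | cons a as => simp

-- A's collapse step on the char-list level
def pvStepC (acc : List (List Char)) (part : List Char) : List (List Char) :=
  if some part == acc.getLast? then acc else acc ++ [part]

theorem pvEmit_fold (rest : List (List Char)) :
    ∀ ns : List (List Char), ns ≠ [] → (∀ x ∈ ns, x ≠ []) → (∀ x ∈ rest, x ≠ []) →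
      rest.foldl pvEmit (pvJoin ns, ns.getLast?)
        = (pvJoin (rest.foldl pvStepC ns), (rest.foldl pvStepC ns).getLast?) := by
  induction rest with
  | nil => intro ns _ _ _; rfl
  | cons seg rest ih =>
    intro ns hne hnsx hrx
    have hseg : seg ≠ [] := hrx seg (by simp)
    by_cases hl : some seg = ns.getLast?
    · have h1 : pvEmit (pvJoin ns, ns.getLast?) seg = (pvJoin ns, ns.getLast?) := by
        simp [pvEmit, hl]
      have h2 : pvStepC ns seg = ns := by simp [pvStepC, hl]
      rw [List.foldl_cons, h1, List.foldl_cons, h2]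
      exact ih ns hne hnsx (fun x hx => hrx x (by simp [hx]))
    · have hout : pvJoin ns ≠ [] := pvJoin_ne_nil ns hne hnsx
      have h1 : pvEmit (pvJoin ns, ns.getLast?) seg = (pvJoin (ns ++ [seg]), (ns ++ [seg]).getLast?) := by
        have hc1 : (seg != [] && (some seg != ns.getLast?)) = true := by simp [hseg, hl]
        have hc2 : (pvJoin ns != []) = true := by simpa using hout
        simp only [pvEmit, hc1, if_true, hc2]
        rw [pvJoin_append_singleton ns seg hne]
        simp
      have h2 : pvStepC ns seg = ns ++ [seg] := by simp [pvStepC, hl]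
      rw [List.foldl_cons, h1, List.foldl_cons, h2]
      exact ih (ns ++ [seg]) (by simp)
        (by intro x hx; rcases List.mem_append.1 hx with h | h
            · exact hnsx x h
            · simpa using (by simpa using h) ▸ hseg)
        (fun x hx => hrx x (by simp [hx]))

theorem pvEmit_skip (xs : List (List Char)) :
    ∀ st, xs.foldl pvEmit st = (xs.filter (fun p => p != [])).foldl pvEmit st := by
  induction xs with
  | nil => intro st; rfl
  | cons x xs ih =>
    intro st
    by_cases hx : x = []
    · subst hx
      have : pvEmit st [] = st := by cases st; simp [pvEmit]
      simp [this, ih]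
    · simp [hx, ih]

theorem pvOfList_bne (x : List Char) : (String.ofList x != "") = (x != []) := by
  by_cases hx : x = []
  · subst hx; rfl
  · have h1 : (String.ofList x != "") = true := by
      simp [bne, show String.ofList x ≠ "" from fun e => hx (String.ofList_inj.mp e)]
    have h2 : (x != []) = true := by simp [bne, hx]
    rw [h1, h2]

theorem pvOfList_beq (a b : List Char) : (String.ofList a == String.ofList b) = (a == b) := by
  by_cases h : a = b
  · subst h; simp
  · simp [h, String.ofList_inj]

theorem pvFilter_map (xs : List (List Char)) :
    (xs.map String.ofList).filter (fun p => p != "")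
      = (xs.filter (fun p => p != [])).map String.ofList := by
  induction xs with
  | nil => rfl
  | cons x xs ih =>
    simp only [List.map_cons, List.filter_cons, pvOfList_bne]
    by_cases hx : x = []
    · subst hx; simpa using ih
    · have : (x != []) = true := by simp [hx]
      rw [this]
      simp [ih]

theorem pvFoldS_eq (rest : List (List Char)) :
    ∀ ns : List (List Char),
      (rest.map String.ofList).foldl
          (fun (acc : List String) part => if some part == acc.getLast? then acc else acc ++ [part])
          (ns.map String.ofList)
        = (rest.foldl pvStepC ns).map String.ofList := by
  induction rest with
  | nil => intro ns; rfl
  | cons x xs ih =>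
    intro ns
    have hcond : (some (String.ofList x) == (ns.map String.ofList).getLast?) = (some x == ns.getLast?) := by
      rw [List.getLast?_map]
      cases hl : ns.getLast? with
      | none => simp
      | some b => simp only [Option.map_some, Option.some_beq_some, pvOfList_beq]
    simp only [List.map_cons, List.foldl_cons, hcond, pvStepC]
    by_cases hc : (some x == ns.getLast?) = true
    · rw [if_pos hc, if_pos hc]; exact ih ns
    · rw [if_neg hc, if_neg hc,
          show List.map String.ofList ns ++ [String.ofList x] = (ns ++ [x]).map String.ofList by simp]
      exact ih (ns ++ [x])


-- ===== VERDICT (by name: the statement is the Claim_ definition above) =====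
theorem normalize_suite_path_spec : Claim_equal_normalize_suite_path := by
  intro value _
  unfold Spec_normalize_suite_path normalize_suite_path normalize_suite_path_alt
  match value with
  | none => rfl
  | some s =>
    by_cases hs : (s == "") = true
    · simp [hs]
    · dsimp only
      rw [if_neg hs, if_neg hs]
      have hsplit : PySem.Str.split? s "/" = some ((pvSplit [] s.toList).map String.ofList) := by
        rw [PySem.Str.split?, show ("/" : String).toList = ['/'] from rfl,
            PySem.Chars.split?]
        simp [pvSplitOn_eq]
      rw [hsplit]
      simp only [Option.getD_some, pvFilter_map]
      rw [pvScan_eq s.toList [] [] none, pvEmit_skip]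
      cases hsegs : (pvSplit [] s.toList).filter (fun p => p != []) with
      | nil => simp
      | cons q rest =>
        have hmem : ∀ x ∈ q :: rest, x ≠ [] := by
          intro x hx
          have := List.of_mem_filter (hsegs ▸ hx)
          simpa using this
        have hq : q ≠ [] := hmem q (by simp)
        simp only [List.map_cons]
        rw [show [String.ofList q] = List.map String.ofList [q] from rfl, pvFoldS_eq rest [q]]
        have hfirst : pvEmit ([], none) q = (pvJoin [q], [q].getLast?) := by
          have hc1 : (q != [] && (some q != (none : Option (List Char)))) = true := by simp [hq]
          simp only [pvEmit, hc1, if_true]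
          simp [pvJoin_singleton]
        rw [List.foldl_cons, hfirst,
            pvEmit_fold rest [q] (by simp) (by simpa using hq) (fun x hx => hmem x (by simp [hx]))]
        set ns := rest.foldl pvStepC [q] with hns
        have : (PySem.Str.join "/" (ns.map String.ofList)).toList = pvJoin ns := by
          rw [PySem.Str.toList_join, show ("/" : String).toList = ['/'] from rfl]
          simp only [PySem.Chars.join, pvJoin, List.map_map]
          congr 1
          rw [show (String.toList ∘ String.ofList) = fun l : List Char => (String.ofList l).toList from rfl]
          calc List.map (fun l : List Char => (String.ofList l).toList) ns
              = List.map id ns := List.map_congr_left (fun x _ => String.toList_ofList)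
            _ = ns := List.map_id ns
        calc PySem.Str.join "/" (ns.map String.ofList)
            = String.ofList (PySem.Str.join "/" (ns.map String.ofList)).toList := (String.ofList_toList).symm
          _ = String.ofList (pvJoin ns) := by rw [this]
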